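-- pv_equiv track=rewrite | github.com/EuphonyDM/cavernsOfCorona | level.py | placeWalls
-- ===== SOURCE A (Python) =====
-- def placeWalls(lines):
--     rows = len(lines)
--     cols = len(lines[0])
--     dirs = [(0,1), (1, 0), (0, -1), (-1, 0)]
--     for row in range(rows):
--         for col in range(cols):
--             if lines[row][col] == " ":
--                 for r, c in dirs:
--                     newR = row + r
--                     newC = col + c
--                     if 0 <= newR < rows and 0 <= newC < cols and lines[newR][newC] == ".":
--                         lines[row] = lines[row][:col]+"#"+lines[row][col+1:]
--     return lines
-- ===== SOURCE B (Python) =====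
-- def placeWalls(lines):
--     # Inverted dilation: scan FLOOR cells and record their in-bounds space
--     # neighbours in a target set, then rewrite each row from that set.
--     rows = len(lines)
--     cols = len(lines[0])
--     targets = set()
--     for r in range(rows):
--         for c in range(cols):
--             if lines[r][c] == ".":
--                 for nr, nc in ((r, c + 1), (r + 1, c), (r, c - 1), (r - 1, c)):
--                     if 0 <= nr < rows and 0 <= nc < cols and lines[nr][nc] == " ":
--                         targets.add((nr, nc))
--     for r in range(rows):
--         cells = list(lines[r])
--         for c in range(cols):
--             if (r, c) in targets:
--                 cells[c] = "#"
--         lines[r] = "".join(cells)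
--     return lines
-- ===== Notes on version B (the rewrite author's own statement) =====
-- stated objective: alternative
-- what changed: A tests every space cell against its four neighbours and splices '#' into the row string immediately during the sweep; B inverts the scan direction: it iterates over floor ('.') cells, collects their in-bounds space neighbours into a target set, and a second staged pass rewrites each row as a mutable char list from that set.
import Mathlib
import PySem

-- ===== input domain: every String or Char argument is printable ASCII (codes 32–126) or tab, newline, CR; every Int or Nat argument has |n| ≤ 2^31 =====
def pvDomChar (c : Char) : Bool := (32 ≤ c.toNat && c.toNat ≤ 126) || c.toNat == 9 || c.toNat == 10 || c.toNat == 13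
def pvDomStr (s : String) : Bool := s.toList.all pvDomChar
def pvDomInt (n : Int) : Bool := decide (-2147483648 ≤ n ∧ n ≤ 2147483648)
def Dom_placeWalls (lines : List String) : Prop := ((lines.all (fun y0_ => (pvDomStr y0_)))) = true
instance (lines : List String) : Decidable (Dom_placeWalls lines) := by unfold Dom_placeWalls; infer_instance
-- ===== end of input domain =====

-- B inverts A's scan: it iterates over floor ('.') cells, collecting their in-bounds
-- space neighbours in a target set, then a second pass rewrites each row from the set;
-- A instead tests each space cell and splices '#' into the row string immediately.
-- Equivalence of the RETURN value is what is proved (both Pythons also mutate `lines`).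

-- ===== PORT A =====
-- grids are handled as lists of code-point lists (String ↔ List Char at the boundary; exact on code points)
def pwGet (g : List (List Char)) (r c : Int) : Char :=
  PySem.List.pyGetD (PySem.List.pyGetD g r []) c ' '

-- lines[row] = lines[row][:col] + "#" + lines[row][col+1:]
def pwSet (g : List (List Char)) (r c : Int) : List (List Char) :=
  PySem.List.pySetD g r
    (PySem.List.slice (PySem.List.pyGetD g r []) none (some c) ++ ['#'] ++
     PySem.List.slice (PySem.List.pyGetD g r []) (some (c + 1)) none)

def pwDirs : List (Int × Int) := [(0, 1), (1, 0), (0, -1), (-1, 0)]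

-- body of A's innermost `for r, c in dirs` loop
def pwStepDir (rows cols row col : Int) (g : List (List Char)) (d : Int × Int) :
    List (List Char) :=
  if 0 ≤ row + d.1 ∧ row + d.1 < rows ∧ 0 ≤ col + d.2 ∧ col + d.2 < cols ∧
      pwGet g (row + d.1) (col + d.2) = '.' then
    pwSet g row col
  else g

-- body of A's `for col in range(cols)` loop
def pwStepCol (rows cols row : Int) (g : List (List Char)) (col : Int) : List (List Char) :=
  if pwGet g row col = ' ' then pwDirs.foldl (pwStepDir rows cols row col) g else g

-- body of A's `for row in range(rows)` loop
def pwStepRow (rows cols : Int) (g : List (List Char)) (row : Int) : List (List Char) :=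
  (PySem.List.pyRange 0 cols 1).foldl (pwStepCol rows cols row) g

def placeWallsCore (g0 : List (List Char)) : List (List Char) :=
  (PySem.List.pyRange 0 (g0.length : Int) 1).foldl
    (pwStepRow (g0.length : Int) ((PySem.List.pyGetD g0 0 []).length : Int)) g0

def placeWalls (lines : List String) : List String :=
  (placeWallsCore (lines.map String.toList)).map String.ofList

-- ===== PORT B =====
-- ((r, c + 1), (r + 1, c), (r, c - 1), (r - 1, c)) — neighbour tuple of a floor cell
def pwNbrs (r c : Int) : List (Int × Int) := [(r, c + 1), (r + 1, c), (r, c - 1), (r - 1, c)]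

-- body of B's innermost `for nr, nc in …: if in-bounds and space: targets.add((nr, nc))`
def pwAddNb (g : List (List Char)) (rows cols : Int) (S : PySem.Set (Int × Int))
    (p : Int × Int) : PySem.Set (Int × Int) :=
  if 0 ≤ p.1 ∧ p.1 < rows ∧ 0 ≤ p.2 ∧ p.2 < cols ∧ pwGet g p.1 p.2 = ' ' then
    PySem.Set.add S p
  else S

-- B's first pass: the target set (consumed ONLY via membership, so set order never matters)
def pwTargets (g : List (List Char)) (rows cols : Int) : PySem.Set (Int × Int) :=
  (PySem.List.pyRange 0 rows 1).foldl (fun S r =>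
    (PySem.List.pyRange 0 cols 1).foldl (fun S c =>
      if pwGet g r c = '.' then (pwNbrs r c).foldl (pwAddNb g rows cols) S else S) S)
    PySem.Set.empty

-- B's per-row rewrite: `cells = list(lines[r]); for c in range(cols): if (r,c) in targets: cells[c] = '#'`
def pwRebuildRow (S : PySem.Set (Int × Int)) (r cols : Int) (row : List Char) : List Char :=
  (PySem.List.pyRange 0 cols 1).foldl (fun cells c =>
    if PySem.Set.contains S (r, c) then PySem.List.pySetD cells c '#' else cells) row

def placeWallsAltCore (g0 : List (List Char)) : List (List Char) :=
  (PySem.List.pyRange 0 (g0.length : Int) 1).foldl (fun acc r =>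
    PySem.List.pySetD acc r
      (pwRebuildRow (pwTargets g0 (g0.length : Int) ((PySem.List.pyGetD g0 0 []).length : Int))
        r ((PySem.List.pyGetD g0 0 []).length : Int) (PySem.List.pyGetD acc r [])))
    g0

def placeWalls_alt (lines : List String) : List String :=
  (placeWallsAltCore (lines.map String.toList)).map String.ofList

-- ===== PRECONDITION & SPEC =====
-- Pre_ excludes exactly the inputs where A raises IndexError: the empty list
-- (lines[0]) and grids with a row shorter than the first row (lines[row][col]).
def Pre_placeWalls (lines : List String) : Prop :=
  lines ≠ [] ∧ ∀ s ∈ lines, (PySem.List.pyGetD lines 0 "").toList.length ≤ s.toList.length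
instance (lines : List String) : Decidable (Pre_placeWalls lines) := by
  unfold Pre_placeWalls; infer_instance

def pvWitness_placeWalls : List String := [" . ", "x..#"]

def Spec_placeWalls (lines : List String) (out : List String) : Prop := out = placeWalls_alt lines
instance (lines : List String) (out : List String) : Decidable (Spec_placeWalls lines out) := by
  unfold Spec_placeWalls; infer_instance

-- ===== CLAIM (what is proved, stated in full; the proofs are below) =====
def Claim_equal_placeWalls : Prop := ∀ (lines : List String), Dom_placeWalls lines → Pre_placeWalls lines → Spec_placeWalls lines (placeWalls lines)

-- ===== LEMMAS AND PROOFS =====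

-- original-grid cell (Nat indices, default ' ')
def pwOrig (L : List (List Char)) (r c : Nat) : Char := (L.getD r []).getD c ' '

def pwCols (L : List (List Char)) : Nat := (PySem.List.pyGetD L 0 []).length

-- A's neighbour test evaluated against the ORIGINAL grid
def pwNbTest (L : List (List Char)) (R C : Nat) (d : Int × Int) : Bool :=
  decide (0 ≤ (R : Int) + d.1 ∧ (R : Int) + d.1 < (L.length : Int) ∧
          0 ≤ (C : Int) + d.2 ∧ (C : Int) + d.2 < (pwCols L : Int)) &&
  (pwOrig L ((R : Int) + d.1).toNat ((C : Int) + d.2).toNat == '.')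

def pwTarg (L : List (List Char)) (R C : Nat) : Bool :=
  decide (C < pwCols L) && (pwOrig L R C == ' ') && pwDirs.any (pwNbTest L R C)

-- the grid with '#' written at every cell where P holds
def pwGrid (L : List (List Char)) (P : Nat → Nat → Bool) : List (List Char) :=
  L.mapIdx (fun r row => row.mapIdx (fun c ch => if P r c then '#' else ch))

theorem pwGrid_length (L : List (List Char)) (P : Nat → Nat → Bool) :
    (pwGrid L P).length = L.length := by simp [pwGrid]

theorem pwGrid_congr (L : List (List Char)) (P Q : Nat → Nat → Bool)
    (h : ∀ r c, r < L.length → P r c = Q r c) : pwGrid L P = pwGrid L Q := by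
  unfold pwGrid
  apply List.ext_getElem (by simp)
  intro r h1 h2
  simp only [List.getElem_mapIdx]
  have hr : r < L.length := by simpa using h1
  have : (fun c ch => if P r c then '#' else ch) = (fun c ch => if Q r c then '#' else ch) := by
    funext c ch; rw [h r c hr]
  rw [this]

theorem pwGet_grid (L : List (List Char)) (P : Nat → Nat → Bool) (r c : Nat)
    (hr : r < L.length) (hc : c < (L.getD r []).length) :
    pwGet (pwGrid L P) (r : Int) (c : Int) = (if P r c then '#' else pwOrig L r c) := by
  have hr' : r < (pwGrid L P).length := by rw [pwGrid_length]; exact hr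
  have hrow : (pwGrid L P).getD r [] = (L.getD r []).mapIdx (fun c ch => if P r c then '#' else ch) := by
    rw [List.getD_eq_getElem _ _ hr', List.getD_eq_getElem _ _ hr]
    simp [pwGrid]
  have hc' : c < ((L.getD r []).mapIdx (fun c ch => if P r c then '#' else ch)).length := by
    simpa using hc
  simp only [pwGet, PySem.List.pyGetD_natCast, hrow,
    List.getD_eq_getElem _ _ hc', List.getElem_mapIdx]
  unfold pwOrig
  rw [List.getD_eq_getElem _ _ hc]

theorem pwSet_grid (L : List (List Char)) (P : Nat → Nat → Bool) (R C : Nat)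
    (hR : R < L.length) (hC : C < (L.getD R []).length) :
    pwSet (pwGrid L P) (R : Int) (C : Int) =
      pwGrid L (fun r c => P r c || (decide (r = R) && decide (c = C))) := by
  have hR' : R < (pwGrid L P).length := by rw [pwGrid_length]; exact hR
  have hrow : PySem.List.pyGetD (pwGrid L P) (R : Int) [] =
      (L.getD R []).mapIdx (fun c ch => if P R c then '#' else ch) := by
    rw [PySem.List.pyGetD_natCast, List.getD_eq_getElem _ _ hR', List.getD_eq_getElem _ _ hR]
    simp [pwGrid]
  have hm : ((L.getD R []).mapIdx (fun c ch => if P R c then '#' else ch)).length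
      = (L.getD R []).length := by simp
  have hc1 : ((C : Int) + 1) = (((C + 1 : Nat)) : Int) := by push_cast; ring
  unfold pwSet
  rw [hrow, hc1, PySem.List.slice_to_natCast, PySem.List.slice_from_natCast]
  have hset : ∀ v, PySem.List.pySetD (pwGrid L P) (R : Int) v = (pwGrid L P).set R v := by
    intro v
    simp [PySem.List.pySetD, PySem.List.pySet?, PySem.List.pyIdx?, hR']
  rw [hset]
  have hCm : C < ((L.getD R []).mapIdx (fun c ch => if P R c then '#' else ch)).length := by
    rw [hm]; exact hC
  have hnr : List.take C ((L.getD R []).mapIdx (fun c ch => if P R c then '#' else ch)) ++ ['#'] ++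
        List.drop (C + 1) ((L.getD R []).mapIdx (fun c ch => if P R c then '#' else ch))
      = ((L.getD R []).mapIdx (fun c ch => if P R c then '#' else ch)).set C '#' := by
    rw [List.set_eq_take_append_cons_drop, if_pos hCm, List.append_assoc, List.singleton_append]
  rw [hnr]
  apply List.ext_getElem (by simp [pwGrid])
  intro r h1 h2
  rw [List.getElem_set]
  by_cases hrR : R = r
  · subst hrR
    rw [if_pos rfl]
    have h2' : R < L.length := by simpa [pwGrid_length] using h2
    simp only [pwGrid, List.getElem_mapIdx]
    apply List.ext_getElem (by simpa using (List.getD_eq_getElem L [] hR).symm ▸ rfl)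
    intro c hc1' hc2'
    rw [List.getElem_set, List.getElem_mapIdx]
    have hgd : L.getD R [] = L[R] := List.getD_eq_getElem L [] hR
    by_cases hcC : C = c
    · subst hcC
      simp
    · rw [if_neg hcC, List.getElem_mapIdx]
      have : (decide (c = C) : Bool) = false := by
        simp [Ne.symm hcC]
      simp only [this, Bool.and_false, Bool.or_false, hgd]
  · rw [if_neg hrR]
    simp only [pwGrid, List.getElem_mapIdx]
    have : (fun c ch => if P r c || (decide (r = R) && decide (c = C)) then '#' else ch)
        = (fun c ch => if P r c then '#' else ch) := by
      funext c ch
      have : (decide (r = R) : Bool) = false := by simp [Ne.symm hrR]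
      simp [this]
    rw [this]

theorem pwGet_nat (g : List (List Char)) (r c : Nat) :
    pwGet g (r : Int) (c : Int) = pwOrig g r c := by
  simp [pwGet, pwOrig]

theorem pwLen (L : List (List Char)) (hlen : ∀ row ∈ L, pwCols L ≤ row.length)
    (r : Nat) (hr : r < L.length) : pwCols L ≤ (L.getD r []).length := by
  rw [List.getD_eq_getElem _ _ hr]
  exact hlen _ (List.getElem_mem hr)

theorem pwTarg_space (L : List (List Char)) (r c : Nat) (h : pwTarg L r c = true) :
    pwOrig L r c = ' ' := by
  simp only [pwTarg, Bool.and_eq_true, beq_iff_eq] at h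
  exact h.1.2

theorem pwTarg_lt (L : List (List Char)) (r c : Nat) (h : pwTarg L r c = true) :
    c < pwCols L := by
  simp only [pwTarg, Bool.and_eq_true, decide_eq_true_eq] at h
  exact h.1.1

-- the '.'-test on a partially walled grid agrees with the test on the original grid
theorem pwDot_grid (L : List (List Char)) (hlen : ∀ row ∈ L, pwCols L ≤ row.length)
    (Q : Nat → Nat → Bool) (hQ : ∀ r c, Q r c = true → pwTarg L r c = true)
    (r c : Nat) (hr : r < L.length) (hc : c < pwCols L) :
    (pwGet (pwGrid L Q) (r : Int) (c : Int) = '.') ↔ (pwOrig L r c = '.') := by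
  have hc' : c < (L.getD r []).length := lt_of_lt_of_le hc (pwLen L hlen r hr)
  rw [pwGet_grid L Q r c hr hc']
  by_cases hq : Q r c = true
  · rw [if_pos hq]
    have := pwTarg_space L r c (hQ r c hq)
    constructor
    · intro h; exact absurd h (by decide)
    · intro h; rw [this] at h; exact absurd h (by decide)
  · rw [if_neg hq]

theorem pwStepDir_grid (L : List (List Char)) (hlen : ∀ row ∈ L, pwCols L ≤ row.length)
    (Q : Nat → Nat → Bool) (hQ : ∀ r c, Q r c = true → pwTarg L r c = true)
    (R C : Nat) (hR : R < L.length) (hC : C < pwCols L) (d : Int × Int) :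
    pwStepDir (L.length : Int) (pwCols L : Int) (R : Int) (C : Int) (pwGrid L Q) d =
      (if pwNbTest L R C d = true then
        pwGrid L (fun r c => Q r c || (decide (r = R) && decide (c = C)))
      else pwGrid L Q) := by
  have hCr : C < (L.getD R []).length := lt_of_lt_of_le hC (pwLen L hlen R hR)
  unfold pwStepDir pwNbTest
  by_cases hb : 0 ≤ (R : Int) + d.1 ∧ (R : Int) + d.1 < (L.length : Int) ∧
      0 ≤ (C : Int) + d.2 ∧ (C : Int) + d.2 < (pwCols L : Int)
  · obtain ⟨hb1, hb2, hb3, hb4⟩ := hb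
    have hr' : ((R : Int) + d.1) = (((R : Int) + d.1).toNat : Int) := by omega
    have hc'' : ((C : Int) + d.2) = (((C : Int) + d.2).toNat : Int) := by omega
    have hrn : ((R : Int) + d.1).toNat < L.length := by omega
    have hcm : ((C : Int) + d.2).toNat < pwCols L := by omega
    have hdot := pwDot_grid L hlen Q hQ _ _ hrn hcm
    rw [hr', hc'']
    have hbnd : 0 ≤ ((((R : Int) + d.1).toNat : Nat) : Int) ∧
        ((((R : Int) + d.1).toNat : Nat) : Int) < (L.length : Int) ∧
        0 ≤ ((((C : Int) + d.2).toNat : Nat) : Int) ∧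
        ((((C : Int) + d.2).toNat : Nat) : Int) < ((pwCols L : Nat) : Int) :=
      ⟨by positivity, by exact_mod_cast hrn, by positivity, by exact_mod_cast hcm⟩
    by_cases hdotv : pwOrig L ((R : Int) + d.1).toNat ((C : Int) + d.2).toNat = '.'
    · rw [if_pos ⟨hbnd.1, hbnd.2.1, hbnd.2.2.1, hbnd.2.2.2, hdot.mpr hdotv⟩,
        if_pos (by rw [decide_eq_true hbnd, Bool.true_and]; exact beq_iff_eq.mpr hdotv),
        pwSet_grid L Q R C hR hCr]
    · rw [if_neg (by intro h; exact hdotv (hdot.mp h.2.2.2.2)),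
        if_neg (by intro h; simp only [Bool.and_eq_true] at h; exact hdotv (eq_of_beq h.2))]
  · rw [if_neg (by intro h; exact hb ⟨h.1, h.2.1, h.2.2.1, h.2.2.2.1⟩),
      if_neg (by simp only [Bool.and_eq_true, decide_eq_true_eq]; intro h; exact hb h.1)]

theorem pwDirsFold_grid (L : List (List Char)) (hlen : ∀ row ∈ L, pwCols L ≤ row.length)
    (ds : List (Int × Int)) (hds : ∀ d ∈ ds, d ∈ pwDirs)
    (Q : Nat → Nat → Bool) (hQ : ∀ r c, Q r c = true → pwTarg L r c = true)
    (R C : Nat) (hR : R < L.length) (hC : C < pwCols L) (hsp : pwOrig L R C = ' ') :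
    ds.foldl (pwStepDir (L.length : Int) (pwCols L : Int) (R : Int) (C : Int)) (pwGrid L Q) =
      pwGrid L (fun r c =>
        Q r c || (ds.any (pwNbTest L R C) && (decide (r = R) && decide (c = C)))) := by
  induction ds generalizing Q with
  | nil =>
    simp only [List.foldl_nil, List.any_nil]
    exact (pwGrid_congr L _ _ (by intro r c _; simp)).symm
  | cons d ds ih =>
    rw [List.foldl_cons, pwStepDir_grid L hlen Q hQ R C hR hC d]
    by_cases ht : pwNbTest L R C d = true
    · rw [if_pos ht]
      have htarg : pwTarg L R C = true := by
        simp only [pwTarg, Bool.and_eq_true, decide_eq_true_eq, beq_iff_eq]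
        exact ⟨⟨hC, hsp⟩, List.any_eq_true.mpr ⟨d, hds d List.mem_cons_self, ht⟩⟩
      have hQ' : ∀ r c, (Q r c || (decide (r = R) && decide (c = C))) = true →
          pwTarg L r c = true := by
        intro r c h
        rcases Bool.or_eq_true_iff.mp h with h | h
        · exact hQ r c h
        · simp only [Bool.and_eq_true, decide_eq_true_eq] at h
          rw [h.1, h.2]; exact htarg
      rw [ih (fun d hd => hds d (List.mem_cons_of_mem _ hd)) _ hQ']
      apply pwGrid_congr
      intro r c _
      simp only [List.any_cons, ht, Bool.true_or]
      cases Q r c <;> cases hrc : (decide (r = R) && decide (c = C)) <;>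
        cases List.any ds (pwNbTest L R C) <;> simp
    · rw [if_neg ht]
      rw [ih (fun d hd => hds d (List.mem_cons_of_mem _ hd)) _ hQ]
      apply pwGrid_congr
      intro r c _
      have ht' : pwNbTest L R C d = false := Bool.eq_false_iff.mpr ht
      simp [List.any_cons, ht']

-- state predicates of A's sweep
def pwPc (L : List (List Char)) (R C : Nat) : Nat → Nat → Bool :=
  fun r c => pwTarg L r c && (decide (r < R) || (decide (r = R) && decide (c < C)))

def pwPr (L : List (List Char)) (R : Nat) : Nat → Nat → Bool :=
  fun r c => pwTarg L r c && decide (r < R)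

theorem pwStepCol_grid (L : List (List Char)) (hlen : ∀ row ∈ L, pwCols L ≤ row.length)
    (R C : Nat) (hR : R < L.length) (hC : C < pwCols L) :
    pwStepCol (L.length : Int) (pwCols L : Int) (R : Int) (pwGrid L (pwPc L R C)) (C : Int) =
      pwGrid L (pwPc L R (C + 1)) := by
  have hQ : ∀ r c, pwPc L R C r c = true → pwTarg L r c = true := by
    intro r c h
    simp only [pwPc, Bool.and_eq_true] at h
    exact h.1
  have hCr : C < (L.getD R []).length := lt_of_lt_of_le hC (pwLen L hlen R hR)
  have hown : pwGet (pwGrid L (pwPc L R C)) (R : Int) (C : Int) = pwOrig L R C := by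
    rw [pwGet_grid L _ R C hR hCr]
    simp [pwPc]
  unfold pwStepCol
  rw [hown]
  by_cases hsp : pwOrig L R C = ' '
  · rw [if_pos hsp, pwDirsFold_grid L hlen pwDirs (fun d hd => hd) _ hQ R C hR hC hsp]
    apply pwGrid_congr
    intro r c _
    simp only [pwPc]
    by_cases hrR : r = R
    · subst hrR
      by_cases hcC : c = C
      · subst hcC
        have : pwTarg L r c = (pwDirs.any (pwNbTest L r c)) := by
          simp [pwTarg, hC, hsp]
        simp [this]
      · have hd1 : decide (c = C) = false := by simp [hcC]
        have hd2 : decide (c < C + 1) = decide (c < C) := decide_eq_decide.mpr (by omega)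
        rw [hd1, hd2]
        simp
    · have hd : decide (r = R) = false := by simp [hrR]
      rw [hd]
      simp
  · rw [if_neg hsp]
    apply pwGrid_congr
    intro r c _
    simp only [pwPc]
    by_cases hrR : r = R
    · subst hrR
      by_cases hcC : c = C
      · subst hcC
        have : pwTarg L r c = false := by
          simp [pwTarg, hsp]
        simp [this]
      · have hd2 : decide (c < C + 1) = decide (c < C) := decide_eq_decide.mpr (by omega)
        rw [hd2]
    · have hd : decide (r = R) = false := by simp [hrR]
      rw [hd]
      simp

theorem pwColFold_grid (L : List (List Char)) (hlen : ∀ row ∈ L, pwCols L ≤ row.length)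
    (R : Nat) (hR : R < L.length) (k C : Nat) (hk : C + k = pwCols L) :
    (List.range' C k).foldl
        (fun g (c : Nat) => pwStepCol (L.length : Int) (pwCols L : Int) (R : Int) g (c : Int))
        (pwGrid L (pwPc L R C)) =
      pwGrid L (pwPc L R (pwCols L)) := by
  induction k generalizing C with
  | zero =>
    simp only [List.range'_zero, List.foldl_nil]
    rw [show C = pwCols L by omega]
  | succ k ih =>
    rw [List.range'_succ, List.foldl_cons,
      pwStepCol_grid L hlen R C hR (by omega)]
    exact ih (C + 1) (by omega)

theorem pwStepRow_grid (L : List (List Char)) (hlen : ∀ row ∈ L, pwCols L ≤ row.length)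
    (R : Nat) (hR : R < L.length) :
    pwStepRow (L.length : Int) (pwCols L : Int) (pwGrid L (pwPr L R)) (R : Int) =
      pwGrid L (pwPr L (R + 1)) := by
  unfold pwStepRow
  rw [PySem.List.pyRange_zero_natCast, List.foldl_map, List.range_eq_range']
  have h0 : pwGrid L (pwPr L R) = pwGrid L (pwPc L R 0) := by
    apply pwGrid_congr; intro r c _; simp [pwPr, pwPc]
  rw [h0, pwColFold_grid L hlen R hR (pwCols L) 0 (by omega)]
  apply pwGrid_congr
  intro r c _
  simp only [pwPc, pwPr]
  by_cases hrR : r = R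
  · subst hrR
    by_cases ht : pwTarg L r c = true
    · simp [ht, pwTarg_lt L r c ht]
    · have ht' : pwTarg L r c = false := Bool.eq_false_iff.mpr ht
      simp [ht']
  · have hd : decide (r = R) = false := by simp [hrR]
    have hd2 : decide (r < R + 1) = decide (r < R) := decide_eq_decide.mpr (by omega)
    rw [hd, hd2]
    simp

theorem pwGrid_false (L : List (List Char)) : pwGrid L (fun _ _ => false) = L := by
  unfold pwGrid
  apply List.ext_getElem (by simp)
  intro r h1 h2
  simp only [List.getElem_mapIdx, Bool.false_eq_true, if_false]
  apply List.ext_getElem (by simp)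
  intro c hc1 hc2
  simp

theorem pwRowFold_grid (L : List (List Char)) (hlen : ∀ row ∈ L, pwCols L ≤ row.length)
    (k R : Nat) (hk : R + k = L.length) :
    (List.range' R k).foldl
        (fun g (r : Nat) => pwStepRow (L.length : Int) (pwCols L : Int) g (r : Int))
        (pwGrid L (pwPr L R)) =
      pwGrid L (pwPr L L.length) := by
  induction k generalizing R with
  | zero =>
    simp only [List.range'_zero, List.foldl_nil]
    rw [show R = L.length by omega]
  | succ k ih =>
    rw [List.range'_succ, List.foldl_cons, pwStepRow_grid L hlen R (by omega)]
    exact ih (R + 1) (by omega)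

theorem placeWallsCore_eq (L : List (List Char))
    (hlen : ∀ row ∈ L, pwCols L ≤ row.length) :
    placeWallsCore L = pwGrid L (pwTarg L) := by
  unfold placeWallsCore
  have hcols : (PySem.List.pyGetD L 0 []).length = pwCols L := rfl
  rw [hcols, PySem.List.pyRange_zero_natCast, List.foldl_map, List.range_eq_range']
  have hstart : pwGrid L (pwPr L 0) = L := by
    rw [pwGrid_congr L (pwPr L 0) (fun _ _ => false) (by intro r c _; simp [pwPr]),
      pwGrid_false]
  have hfold := pwRowFold_grid L hlen L.length 0 (by omega)
  rw [hstart] at hfold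
  rw [hfold]
  apply pwGrid_congr
  intro r c hr
  simp [pwPr, hr]

-- ===== B-side lemmas =====

-- the condition under which pwAddNb actually inserts its argument
def pwCond (L : List (List Char)) (p : Int × Int) : Prop :=
  0 ≤ p.1 ∧ p.1 < (L.length : Int) ∧ 0 ≤ p.2 ∧ p.2 < (pwCols L : Int) ∧ pwGet L p.1 p.2 = ' '

-- generic membership through a foldl whose step satisfies a pointwise iff
theorem mem_foldl_iff {α β : Type} (p : α) (l : List β) (f : List α → β → List α)
    (Q : β → Prop) (h : ∀ (S : List α) (x : β), p ∈ f S x ↔ p ∈ S ∨ Q x) :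
    ∀ S : List α, p ∈ l.foldl f S ↔ p ∈ S ∨ ∃ x ∈ l, Q x := by
  induction l with
  | nil => intro S; simp
  | cons x l ih =>
    intro S
    rw [List.foldl_cons, ih (f S x), h S x]
    constructor
    · rintro (⟨h1 | h1⟩ | ⟨y, hy, hQ⟩)
      · exact Or.inl h1
      · exact Or.inr ⟨x, List.mem_cons_self, h1⟩
      · exact Or.inr ⟨y, List.mem_cons_of_mem _ hy, hQ⟩
    · rintro (h1 | ⟨y, hy, hQ⟩)
      · exact Or.inl (Or.inl h1)
      · rcases List.mem_cons.mp hy with rfl | hy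
        · exact Or.inl (Or.inr hQ)
        · exact Or.inr ⟨y, hy, hQ⟩

theorem mem_addNb (L : List (List Char)) (p : Int × Int) (S : PySem.Set (Int × Int))
    (x : Int × Int) :
    p ∈ pwAddNb L (L.length : Int) (pwCols L : Int) S x ↔ p ∈ S ∨ (x = p ∧ pwCond L p) := by
  unfold pwAddNb pwCond
  split_ifs with h
  · rw [PySem.Set.mem_add]
    constructor
    · rintro (h1 | rfl)
      · exact Or.inl h1
      · exact Or.inr ⟨rfl, h⟩
    · rintro (h1 | ⟨rfl, _⟩)
      · exact Or.inl h1
      · exact Or.inr rfl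
  · constructor
    · exact Or.inl
    · rintro (h1 | ⟨rfl, hc⟩)
      · exact h1
      · exact absurd hc h

theorem mem_targets (L : List (List Char)) (p : Int × Int) :
    p ∈ pwTargets L (L.length : Int) (pwCols L : Int) ↔
      (∃ fr < L.length, ∃ fc < pwCols L,
        pwGet L (fr : Int) (fc : Int) = '.' ∧ p ∈ pwNbrs (fr : Int) (fc : Int)) ∧
      pwCond L p := by
  unfold pwTargets
  rw [PySem.List.pyRange_zero_natCast (L.length), List.foldl_map]
  have hinner : ∀ (fr fc : Nat) (S : PySem.Set (Int × Int)),
      p ∈ (if pwGet L (fr : Int) (fc : Int) = '.' then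
            (pwNbrs (fr : Int) (fc : Int)).foldl
              (pwAddNb L (L.length : Int) (pwCols L : Int)) S
          else S) ↔
        p ∈ S ∨ (pwGet L (fr : Int) (fc : Int) = '.' ∧
          p ∈ pwNbrs (fr : Int) (fc : Int) ∧ pwCond L p) := by
    intro fr fc S
    split_ifs with hdot
    · rw [mem_foldl_iff p _ _ (fun x => x = p ∧ pwCond L p) (mem_addNb L p) S]
      constructor
      · rintro (h1 | ⟨x, hx, rfl, hc⟩)
        · exact Or.inl h1
        · exact Or.inr ⟨hdot, hx, hc⟩
      · rintro (h1 | ⟨_, hx, hc⟩)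
        · exact Or.inl h1
        · exact Or.inr ⟨p, hx, rfl, hc⟩
    · constructor
      · exact Or.inl
      · rintro (h1 | ⟨hd, _⟩)
        · exact h1
        · exact absurd hd hdot
  have hmid : ∀ (fr : Nat) (S : PySem.Set (Int × Int)),
      p ∈ (PySem.List.pyRange 0 (pwCols L : Int) 1).foldl (fun S c =>
            if pwGet L (fr : Int) c = '.' then
              (pwNbrs (fr : Int) c).foldl (pwAddNb L (L.length : Int) (pwCols L : Int)) S
            else S) S ↔
        p ∈ S ∨ ∃ fc < pwCols L, pwGet L (fr : Int) (fc : Int) = '.' ∧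
          p ∈ pwNbrs (fr : Int) (fc : Int) ∧ pwCond L p := by
    intro fr S
    rw [PySem.List.pyRange_zero_natCast (pwCols L), List.foldl_map]
    rw [mem_foldl_iff p _ _
      (fun fc : Nat => pwGet L (fr : Int) (fc : Int) = '.' ∧
        p ∈ pwNbrs (fr : Int) (fc : Int) ∧ pwCond L p)
      (fun S fc => hinner fr fc S) S]
    simp [List.mem_range]
  rw [mem_foldl_iff p _ _
    (fun fr : Nat => ∃ fc < pwCols L, pwGet L (fr : Int) (fc : Int) = '.' ∧
      p ∈ pwNbrs (fr : Int) (fc : Int) ∧ pwCond L p)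
    (fun S fr => hmid fr S) PySem.Set.empty]
  constructor
  · rintro (h1 | ⟨fr, hfr, fc, hfc, hd, hn, hc⟩)
    · exact absurd h1 (by simp [PySem.Set.empty])
    · exact ⟨⟨fr, by simpa using hfr, fc, hfc, hd, hn⟩, hc⟩
  · rintro ⟨⟨fr, hfr, fc, hfc, hd, hn⟩, hc⟩
    exact Or.inr ⟨fr, by simpa using hfr, fc, hfc, hd, hn, hc⟩

-- the existential over floor cells agrees with A's neighbour test
theorem floor_iff_nbtest (L : List (List Char)) (R C : Nat)
    (hR : R < L.length) (hC : C < pwCols L) :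
    ((∃ fr < L.length, ∃ fc < pwCols L,
        pwGet L (fr : Int) (fc : Int) = '.' ∧
        ((R : Int), (C : Int)) ∈ pwNbrs (fr : Int) (fc : Int))) ↔
      pwDirs.any (pwNbTest L R C) = true := by
  constructor
  · rintro ⟨fr, hfr, fc, hfc, hd, hn⟩
    rw [pwGet_nat] at hd
    rw [List.any_eq_true]
    simp only [pwNbrs, List.mem_cons, List.not_mem_nil, or_false, Prod.mk.injEq] at hn
    rcases hn with ⟨h1, h2⟩ | ⟨h1, h2⟩ | ⟨h1, h2⟩ | ⟨h1, h2⟩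
    · -- (R,C) = (fr, fc+1): floor is to the LEFT, d = (0,-1)
      refine ⟨(0, -1), by simp [pwDirs], ?_⟩
      have hfr' : fr = R := by omega
      have hfc' : fc = C - 1 ∧ 1 ≤ C := by omega
      unfold pwNbTest
      have hb : 0 ≤ (R : Int) + (0:Int) ∧ (R : Int) + (0:Int) < (L.length : Int) ∧
          0 ≤ (C : Int) + (-1:Int) ∧ (C : Int) + (-1:Int) < (pwCols L : Int) := by omega
      rw [decide_eq_true hb, Bool.true_and, beq_iff_eq]
      have e1 : ((R : Int) + 0).toNat = fr := by omega
      have e2 : ((C : Int) + (-1)).toNat = fc := by omega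
      rw [e1, e2]
      exact hd
    · refine ⟨(-1, 0), by simp [pwDirs], ?_⟩
      unfold pwNbTest
      have hb : 0 ≤ (R : Int) + (-1:Int) ∧ (R : Int) + (-1:Int) < (L.length : Int) ∧
          0 ≤ (C : Int) + (0:Int) ∧ (C : Int) + (0:Int) < (pwCols L : Int) := by omega
      rw [decide_eq_true hb, Bool.true_and, beq_iff_eq]
      have e1 : ((R : Int) + (-1)).toNat = fr := by omega
      have e2 : ((C : Int) + 0).toNat = fc := by omega
      rw [e1, e2]
      exact hd
    · refine ⟨(0, 1), by simp [pwDirs], ?_⟩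
      unfold pwNbTest
      have hb : 0 ≤ (R : Int) + (0:Int) ∧ (R : Int) + (0:Int) < (L.length : Int) ∧
          0 ≤ (C : Int) + (1:Int) ∧ (C : Int) + (1:Int) < (pwCols L : Int) := by omega
      rw [decide_eq_true hb, Bool.true_and, beq_iff_eq]
      have e1 : ((R : Int) + 0).toNat = fr := by omega
      have e2 : ((C : Int) + 1).toNat = fc := by omega
      rw [e1, e2]
      exact hd
    · refine ⟨(1, 0), by simp [pwDirs], ?_⟩
      unfold pwNbTest
      have hb : 0 ≤ (R : Int) + (1:Int) ∧ (R : Int) + (1:Int) < (L.length : Int) ∧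
          0 ≤ (C : Int) + (0:Int) ∧ (C : Int) + (0:Int) < (pwCols L : Int) := by omega
      rw [decide_eq_true hb, Bool.true_and, beq_iff_eq]
      have e1 : ((R : Int) + 1).toNat = fr := by omega
      have e2 : ((C : Int) + 0).toNat = fc := by omega
      rw [e1, e2]
      exact hd
  · intro h
    rcases List.any_eq_true.mp h with ⟨d, hdm, ht⟩
    unfold pwNbTest at ht
    rw [Bool.and_eq_true, decide_eq_true_eq, beq_iff_eq] at ht
    obtain ⟨⟨hb1, hb2, hb3, hb4⟩, hdot⟩ := ht
    refine ⟨((R : Int) + d.1).toNat, by omega, ((C : Int) + d.2).toNat, by omega, ?_, ?_⟩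
    · rw [pwGet_nat]; exact hdot
    · have e1 : ((((R : Int) + d.1).toNat : Nat) : Int) = (R : Int) + d.1 := by omega
      have e2 : ((((C : Int) + d.2).toNat : Nat) : Int) = (C : Int) + d.2 := by omega
      rw [e1, e2]
      simp only [pwDirs, List.mem_cons, List.not_mem_nil, or_false] at hdm
      rcases hdm with rfl | rfl | rfl | rfl <;>
        simp [pwNbrs, Prod.ext_iff]

-- membership in the target set, at Nat coordinates, is exactly pwTarg
theorem mem_targets_targ (L : List (List Char)) (R C : Nat)
    (hR : R < L.length) (hC : C < pwCols L) :
    (((R : Int), (C : Int)) ∈ pwTargets L (L.length : Int) (pwCols L : Int)) ↔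
      pwTarg L R C = true := by
  rw [mem_targets]
  unfold pwTarg pwCond
  rw [floor_iff_nbtest L R C hR hC]
  simp only [Bool.and_eq_true, decide_eq_true_eq, beq_iff_eq]
  constructor
  · rintro ⟨hany, _, _, _, _, hsp⟩
    rw [pwGet_nat] at hsp
    exact ⟨⟨hC, hsp⟩, hany⟩
  · rintro ⟨⟨_, hsp⟩, hany⟩
    refine ⟨hany, by omega, by omega, by omega, by omega, ?_⟩
    rw [pwGet_nat]
    exact hsp

-- B's inner rewrite loop, characterised elementwise
theorem foldl_set_spec (P : Nat → Bool) :
    ∀ (k C : Nat) (row : List Char),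
    (List.range' C k).foldl
        (fun cells (c : Nat) => if P c then PySem.List.pySetD cells (c : Int) '#' else cells)
        row =
      row.mapIdx (fun c ch => if (decide (C ≤ c) && decide (c < C + k) && P c) = true then '#' else ch) := by
  intro k
  induction k with
  | zero =>
    intro C row
    simp only [List.range'_zero, List.foldl_nil]
    apply List.ext_getElem (by simp)
    intro j h1 h2
    simp only [List.getElem_mapIdx]
    rw [if_neg (fun h => by simp only [Bool.and_eq_true, decide_eq_true_eq] at h; omega)]
  | succ k ih =>
    intro C row
    rw [List.range'_succ, List.foldl_cons]
    by_cases hp : P C = true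
    · rw [if_pos hp, PySem.List.pySetD_natCast, ih (C + 1)]
      apply List.ext_getElem (by simp)
      intro j h1 h2
      simp only [List.getElem_mapIdx, List.getElem_set]
      by_cases hj : C = j
      · subst hj
        have hc1 : (decide (C + 1 ≤ C) : Bool) = false := by simp
        have hc2 : C < C + (k + 1) := by omega
        simp [hp, hc2]
      · rw [if_neg hj]
        have hb1 : (decide (C + 1 ≤ j) : Bool) = decide (C ≤ j) :=
          decide_eq_decide.mpr (by omega)
        have hb2 : (decide (j < C + 1 + k) : Bool) = decide (j < C + (k + 1)) :=
          decide_eq_decide.mpr (by omega)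
        rw [hb1, hb2]
    · rw [if_neg hp, ih (C + 1)]
      apply List.ext_getElem (by simp)
      intro j h1 h2
      simp only [List.getElem_mapIdx]
      by_cases hj : C = j
      · subst hj
        simp [hp]
      · have hb1 : (decide (C + 1 ≤ j) : Bool) = decide (C ≤ j) :=
          decide_eq_decide.mpr (by omega)
        have hb2 : (decide (j < C + 1 + k) : Bool) = decide (j < C + (k + 1)) :=
          decide_eq_decide.mpr (by omega)
        rw [hb1, hb2]

theorem pwRebuildRow_eq (L : List (List Char)) (S : PySem.Set (Int × Int)) (r : Nat)
    (row : List Char) :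
    pwRebuildRow S (r : Int) (pwCols L : Int) row =
      row.mapIdx (fun c ch =>
        if (decide (c < pwCols L) && PySem.Set.contains S ((r : Int), (c : Int))) = true
        then '#' else ch) := by
  unfold pwRebuildRow
  rw [PySem.List.pyRange_zero_natCast (pwCols L), List.foldl_map, List.range_eq_range']
  have h := foldl_set_spec (fun c : Nat => PySem.Set.contains S ((r : Int), (c : Int)))
    (pwCols L) 0 row
  refine Eq.trans h ?_
  apply List.ext_getElem (by simp)
  intro j h1 h2
  simp only [List.getElem_mapIdx]
  have hc : (decide (0 ≤ j) && decide (j < 0 + pwCols L) && PySem.Set.contains S ((r : Int), (j : Int)))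
      = (decide (j < pwCols L) && PySem.Set.contains S ((r : Int), (j : Int))) := by
    simp
  rw [hc]

-- B's outer pass: fold of row rewrites = mapIdx
theorem pwOuterFold (F : Nat → List Char → List Char) (L : List (List Char)) :
    ∀ (k R : Nat), R + k = L.length →
    (List.range' R k).foldl
        (fun acc (r : Nat) =>
          PySem.List.pySetD acc (r : Int) (F r (PySem.List.pyGetD acc (r : Int) [])))
        (L.mapIdx (fun r row => if r < R then F r row else row)) =
      L.mapIdx (fun r row => F r row) := by
  intro k
  induction k with
  | zero =>
    intro R hk
    simp only [List.range'_zero, List.foldl_nil]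
    apply List.ext_getElem (by simp)
    intro j h1 h2
    simp only [List.getElem_mapIdx]
    rw [if_pos (by simp at h1; omega)]
  | succ k ih =>
    intro R hk
    rw [List.range'_succ, List.foldl_cons]
    have hR : R < L.length := by omega
    have hRlen : R < (L.mapIdx (fun r row => if r < R then F r row else row)).length := by
      simpa using hR
    have hget : PySem.List.pyGetD (L.mapIdx (fun r row => if r < R then F r row else row))
        (R : Int) [] = L[R] := by
      rw [PySem.List.pyGetD_natCast, List.getD_eq_getElem _ _ hRlen, List.getElem_mapIdx]
      rw [if_neg (by omega)]
    have hset : PySem.List.pySetD (L.mapIdx (fun r row => if r < R then F r row else row))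
        (R : Int) (F R L[R]) =
        L.mapIdx (fun r row => if r < R + 1 then F r row else row) := by
      rw [PySem.List.pySetD_natCast]
      apply List.ext_getElem (by simp)
      intro j h1 h2
      rw [List.getElem_set]
      by_cases hjR : R = j
      · subst hjR
        rw [if_pos rfl, List.getElem_mapIdx, if_pos (by omega)]
      · rw [if_neg hjR]
        simp only [List.getElem_mapIdx]
        have : (j < R) ↔ (j < R + 1) := by omega
        simp only [this]
    rw [hget, hset]
    exact ih (R + 1) (by omega)

theorem placeWallsAltCore_eq (L : List (List Char)) :
    placeWallsAltCore L = pwGrid L (pwTarg L) := by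
  unfold placeWallsAltCore
  have hcols : (PySem.List.pyGetD L 0 []).length = pwCols L := rfl
  rw [hcols, PySem.List.pyRange_zero_natCast (L.length), List.foldl_map, List.range_eq_range']
  have hstart : L.mapIdx (fun r row => if r < 0 then
      pwRebuildRow (pwTargets L (L.length : Int) (pwCols L : Int)) (r : Int) (pwCols L : Int) row
    else row) = L := by
    apply List.ext_getElem (by simp)
    intro j h1 h2
    simp only [List.getElem_mapIdx]
    rw [if_neg (by omega)]
  have hfold := pwOuterFold
    (fun r row => pwRebuildRow (pwTargets L (L.length : Int) (pwCols L : Int)) (r : Int)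
      (pwCols L : Int) row) L L.length 0 (by omega)
  rw [hstart] at hfold
  have hmap : L.mapIdx (fun r row =>
      pwRebuildRow (pwTargets L (L.length : Int) (pwCols L : Int)) (r : Int) (pwCols L : Int) row) =
      pwGrid L (fun r c =>
        decide (c < pwCols L) &&
        PySem.Set.contains (pwTargets L (L.length : Int) (pwCols L : Int)) ((r : Int), (c : Int))) := by
    unfold pwGrid
    apply List.ext_getElem (by simp)
    intro j h1 h2
    simp only [List.getElem_mapIdx]
    rw [pwRebuildRow_eq]
  have hcongr : pwGrid L (fun r c =>
      decide (c < pwCols L) &&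
      PySem.Set.contains (pwTargets L (L.length : Int) (pwCols L : Int)) ((r : Int), (c : Int))) =
      pwGrid L (pwTarg L) := by
    apply pwGrid_congr
    intro r c hr
    by_cases hc : c < pwCols L
    · have hmem := mem_targets_targ L r c hr hc
      by_cases ht : pwTarg L r c = true
      · rw [ht, decide_eq_true hc, Bool.true_and]
        exact (PySem.Set.contains_iff _ _).mpr (hmem.mpr ht)
      · have ht' : pwTarg L r c = false := Bool.eq_false_iff.mpr ht
        rw [ht', decide_eq_true hc, Bool.true_and]
        cases h : PySem.Set.contains (pwTargets L (L.length : Int) (pwCols L : Int))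
            ((r : Int), (c : Int))
        · rfl
        · exact absurd (hmem.mp ((PySem.Set.contains_iff _ _).mp h)) ht
    · have h1 : (decide (c < pwCols L) : Bool) = false := by simp [hc]
      have h2 : pwTarg L r c = false := by
        cases h : pwTarg L r c
        · rfl
        · exact absurd (pwTarg_lt L r c h) hc
      rw [h1, h2, Bool.false_and]
  exact hfold.trans (hmap.trans hcongr)

-- ===== VERDICT (by name: the statement is the Claim_ definition above) =====
theorem placeWalls_spec : Claim_equal_placeWalls := by
  intro lines _ hpre
  unfold Spec_placeWalls placeWalls placeWalls_alt
  have hlen : ∀ row ∈ lines.map String.toList, pwCols (lines.map String.toList) ≤ row.length := by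
    intro row hrow
    rcases List.mem_map.mp hrow with ⟨s, hs, rfl⟩
    have := hpre.2 s hs
    have hmap : PySem.List.pyGetD (lines.map String.toList) 0 [] =
        (PySem.List.pyGetD lines 0 "").toList := by
      simpa using PySem.List.pyGetD_map String.toList lines 0 ""
    simpa [pwCols, hmap] using this
  rw [placeWallsCore_eq _ hlen, placeWallsAltCore_eq]
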